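-- pv_equiv track=rewrite | github.com/TritonVera/DPS | Model_app/Свертка и детектор/Processor_F.py | __CConvolution
-- ===== SOURCE A (Python) =====
-- def __CConvolution(in1, in2):
--
--     value = []
--
--     for i in range(0, len(in2)-len(in1) + 1):
--       temp = 0
--       for j in range(0, len(in1)):
--         if in1[j] == in2[i+j]:
--           temp = temp + 1
--       temp = temp - (len(in1) - temp)
--       value.append(temp)
--
--     return(value)
-- ===== SOURCE B (Python) =====
-- def __CConvolution(in1, in2):
--     # Transposed traversal: one pass per template symbol over all window
--     # positions, accumulating the score 2*matches - len(in1) directly.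
--     w = len(in2) - len(in1) + 1
--     score = [-len(in1)] * w          # negative w gives []
--     for j, t in enumerate(in1):
--         score = [s + 2 if in2[i + j] == t else s for i, s in enumerate(score)]
--     return score
-- ===== Notes on version B (the rewrite author's own statement) =====
-- stated objective: alternative
-- what changed: A scans each window and counts matches with an inner loop, then post-transforms the count; B traverses transposed: one accumulation pass over all window positions per template symbol, maintaining the final score 2*matches - len(in1) directly in a vector.
import Mathlib
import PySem

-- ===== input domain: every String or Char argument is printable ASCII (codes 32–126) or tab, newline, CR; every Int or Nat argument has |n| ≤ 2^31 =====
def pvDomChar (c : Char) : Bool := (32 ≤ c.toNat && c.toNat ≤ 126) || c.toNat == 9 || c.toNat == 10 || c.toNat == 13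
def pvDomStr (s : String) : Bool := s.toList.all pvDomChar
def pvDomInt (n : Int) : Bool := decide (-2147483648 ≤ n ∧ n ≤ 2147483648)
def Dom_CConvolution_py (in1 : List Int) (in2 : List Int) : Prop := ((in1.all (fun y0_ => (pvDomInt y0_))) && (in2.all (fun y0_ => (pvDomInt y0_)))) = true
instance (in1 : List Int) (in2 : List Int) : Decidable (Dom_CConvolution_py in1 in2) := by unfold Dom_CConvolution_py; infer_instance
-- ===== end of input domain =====

-- B replaces A's per-window inner match-counting loop by a transposed traversal (one
-- accumulation pass over all window positions per template symbol), keeping the score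
-- 2*matches - len(in1) directly; objective: alternative (same asymptotic cost).

-- ===== PORT A =====
def CConvolution_py (in1 : List Int) (in2 : List Int) : List Int :=
  (PySem.List.pyRange 0 (PySem.List.len in2 - PySem.List.len in1 + 1) 1).foldl
    (fun value i =>
      let temp : Int :=
        (PySem.List.pyRange 0 (PySem.List.len in1) 1).foldl
          (fun temp j =>
            if PySem.List.pyGetD in1 j 0 = PySem.List.pyGetD in2 (i + j) 0 then temp + 1 else temp)
          0
      value ++ [temp - (PySem.List.len in1 - temp)])
    []

-- ===== PORT B =====
def CConvolution_py_alt (in1 : List Int) (in2 : List Int) : List Int :=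
  let w : Int := PySem.List.len in2 - PySem.List.len in1 + 1
  (PySem.List.enumerate in1).foldl
    (fun score jt =>
      (PySem.List.enumerate score).map
        (fun is => if PySem.List.pyGetD in2 (is.1 + jt.1) 0 = jt.2 then is.2 + 2 else is.2))
    (List.replicate w.toNat (-(PySem.List.len in1)))

-- ===== PRECONDITION & SPEC =====
def Spec_CConvolution_py (in1 : List Int) (in2 : List Int) (out : List Int) : Prop := out = CConvolution_py_alt in1 in2
instance (in1 : List Int) (in2 : List Int) (out : List Int) : Decidable (Spec_CConvolution_py in1 in2 out) := by unfold Spec_CConvolution_py; infer_instance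

-- ===== CLAIM (what is proved, stated in full; the proofs are below) =====
def Claim_equal_CConvolution_py : Prop := ∀ (in1 : List Int) (in2 : List Int), Dom_CConvolution_py in1 in2 → Spec_CConvolution_py in1 in2 (CConvolution_py in1 in2)

-- ===== LEMMAS AND PROOFS =====

-- number of template/signal matches for the window starting at position i
def pvCnt (in1 in2 : List Int) (i : Nat) : Nat :=
  (List.range in1.length).countP
    (fun (j : Nat) => decide (PySem.List.pyGetD in2 ((i : Int) + (j : Int)) 0 = in1.getD j 0))

-- the common closed form both ports are reduced to
def pvSpec (in1 in2 : List Int) : List Int :=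
  (List.range (in2.length + 1 - in1.length)).map
    (fun (i : Nat) => 2 * (pvCnt in1 in2 i : Int) - in1.length)

lemma enum_eq {α : Type} (d : α) : ∀ (acc : List α) (s : Int),
    PySem.List.enumerate acc s
      = (List.range acc.length).map (fun (i : Nat) => (s + (i : Int), acc.getD i d)) := by
  intro acc
  induction acc with
  | nil => intro s; rfl
  | cons a t ih =>
      intro s
      show (s, a) :: PySem.List.enumerate t (s + 1) = _
      rw [ih (s + 1)]
      simp [List.range_succ_eq_map, List.map_map]
      intro a _
      ring

lemma enum_cons {α : Type} (x : α) (t : List α) (s : Int) :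
    PySem.List.enumerate (x :: t) s = (s, x) :: PySem.List.enumerate t (s + 1) := rfl

lemma step_map (in2 : List Int) (k x : Int) (acc : List Int) :
    (PySem.List.enumerate acc).map
        (fun is => if PySem.List.pyGetD in2 (is.1 + k) 0 = x then is.2 + 2 else is.2)
      = (List.range acc.length).map
        (fun (i : Nat) => acc.getD i 0 + if PySem.List.pyGetD in2 ((i : Int) + k) 0 = x then 2 else 0) := by
  show (PySem.List.enumerate acc 0).map _ = _
  rw [enum_eq 0 acc 0]
  rw [List.map_map]
  apply List.map_congr_left
  intro i _
  by_cases h : PySem.List.pyGetD in2 ((i : Int) + k) 0 = x <;>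
    simp [h]

lemma loopB_inv (in2 : List Int) : ∀ (l : List Int) (k : Nat) (acc : List Int),
    List.foldl
      (fun score (jt : Int × Int) =>
        (PySem.List.enumerate score).map
          (fun is => if PySem.List.pyGetD in2 (is.1 + jt.1) 0 = jt.2 then is.2 + 2 else is.2))
      acc (PySem.List.enumerate l (k : Int))
    = (List.range acc.length).map
        (fun (i : Nat) => acc.getD i 0 + 2 * (((List.range l.length).countP
            (fun (j : Nat) => decide (PySem.List.pyGetD in2 ((i : Int) + ((k + j : Nat) : Int)) 0 = l.getD j 0)) : Nat) : Int)) := by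
  intro l
  induction l with
  | nil =>
      intro k acc
      show acc = _
      apply List.ext_getElem
      · simp
      · intro i h1 h2
        simp [List.getElem?_eq_getElem h1]
  | cons x t ih =>
      intro k acc
      rw [enum_cons, List.foldl_cons]
      show List.foldl _ ((PySem.List.enumerate acc).map _) _ = _
      rw [step_map]
      rw [show ((k : Int) + 1) = (((k + 1 : Nat)) : Int) by push_cast; ring]
      rw [ih (k + 1)]
      apply List.ext_getElem
      · simp
      · intro i h1 h2
        simp only [List.length_map, List.length_range] at h1 h2
        rw [List.getElem_map, List.getElem_map, List.getElem_range, List.getElem_range]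
        rw [List.getD_eq_getElem?_getD, List.getElem?_map, List.getElem?_range h2]
        simp only [Option.map_some, Option.getD_some]
        have hcnt : (List.range t.length).countP
            (fun (j : Nat) => decide (PySem.List.pyGetD in2 ((i : Int) + (((k + 1) + j : Nat) : Int)) 0 = t.getD j 0))
            = (List.range t.length).countP
            (fun (j : Nat) => decide (PySem.List.pyGetD in2 ((i : Int) + ((k + (j + 1) : Nat) : Int)) 0 = (x :: t).getD (j + 1) 0)) := by
          apply List.countP_congr
          intro j _
          have : (k + 1) + j = k + (j + 1) := by omega
          rw [this]
          rfl
        rw [hcnt]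
        have hsplit : (List.range (x :: t).length).countP
            (fun (j : Nat) => decide (PySem.List.pyGetD in2 ((i : Int) + ((k + j : Nat) : Int)) 0 = (x :: t).getD j 0))
            = ((List.range t.length).countP
                (fun (j : Nat) => decide (PySem.List.pyGetD in2 ((i : Int) + ((k + (j + 1) : Nat) : Int)) 0 = (x :: t).getD (j + 1) 0)))
              + (if PySem.List.pyGetD in2 ((i : Int) + (k : Int)) 0 = x then 1 else 0) := by
          show (List.range (t.length + 1)).countP _ = _
          rw [List.range_succ_eq_map, List.countP_cons, List.countP_map]
          congr 1
          simp
        rw [hsplit]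
        by_cases hc : PySem.List.pyGetD in2 ((i : Int) + (k : Int)) 0 = x
        · simp [hc]; ring
        · simp [hc]

lemma A_eq (in1 in2 : List Int) : CConvolution_py in1 in2 = pvSpec in1 in2 := by
  unfold CConvolution_py pvSpec
  rw [PySem.List.foldl_append_singleton_eq_map, List.nil_append]
  rw [PySem.List.pyRange_one, PySem.List.pyRange_one, List.map_map]
  have hlen : ((PySem.List.len in2 - PySem.List.len in1 + 1) - 0).toNat = in2.length + 1 - in1.length := by
    simp [PySem.List.len_eq]
    omega
  rw [hlen]
  apply List.map_congr_left
  intro i hi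
  simp only [Function.comp_apply]
  have hm : (PySem.List.len in1 - 0).toNat = in1.length := by
    simp [PySem.List.len_eq]
  rw [hm]
  have hfold := PySem.List.foldl_count_if
      (fun (j : Nat) => decide (PySem.List.pyGetD in1 (0 + (j : Int)) 0 = PySem.List.pyGetD in2 (0 + (i : Int) + (0 + (j : Int))) 0))
      (List.range in1.length) 0
  simp only [decide_eq_true_eq] at hfold
  rw [List.foldl_map, hfold]
  have hcnt : (List.range in1.length).countP
      (fun (j : Nat) => decide (PySem.List.pyGetD in1 (0 + (j : Int)) 0 = PySem.List.pyGetD in2 (0 + (i : Int) + (0 + (j : Int))) 0))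
      = pvCnt in1 in2 i := by
    unfold pvCnt
    apply List.countP_congr
    intro j _
    simp [PySem.List.pyGetD_natCast, eq_comm]
  rw [hcnt]
  simp [PySem.List.len_eq]
  ring

lemma B_eq (in1 in2 : List Int) : CConvolution_py_alt in1 in2 = pvSpec in1 in2 := by
  unfold CConvolution_py_alt pvSpec
  have h := loopB_inv in2 in1 0 (List.replicate (PySem.List.len in2 - PySem.List.len in1 + 1).toNat (-(PySem.List.len in1)))
  simp only [Nat.cast_zero] at h
  show List.foldl _ (List.replicate (PySem.List.len in2 - PySem.List.len in1 + 1).toNat (-(PySem.List.len in1))) (PySem.List.enumerate in1 0) = _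
  rw [h]
  have hlen : (List.replicate (PySem.List.len in2 - PySem.List.len in1 + 1).toNat (-(PySem.List.len in1))).length
      = in2.length + 1 - in1.length := by
    simp [PySem.List.len_eq]
    omega
  rw [hlen]
  apply List.map_congr_left
  intro i hi
  have hi' : i < (PySem.List.len in2 - PySem.List.len in1 + 1).toNat := by
    simp only [List.length_replicate] at hlen
    simp only [List.mem_range] at hi
    omega
  rw [List.getD_replicate _ hi']
  have hcnt : (List.range in1.length).countP
      (fun (j : Nat) => decide (PySem.List.pyGetD in2 ((i : Int) + ((0 + j : Nat) : Int)) 0 = in1.getD j 0))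
      = pvCnt in1 in2 i := by
    unfold pvCnt
    apply List.countP_congr
    intro j _
    simp
  rw [hcnt]
  simp [PySem.List.len_eq]
  ring

-- ===== VERDICT (by name: the statement is the Claim_ definition above) =====
theorem CConvolution_py_spec : Claim_equal_CConvolution_py := by
  intro in1 in2 _
  unfold Spec_CConvolution_py
  rw [A_eq, B_eq]
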